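-- pv_equiv track=rewrite | github.com/DominikWojtanowski/Matura-informatyka | 2015 - Przykladowy arkusz/Zadanie 4/zadanie_4.py | createLargestAnagram
-- ===== SOURCE A (Python) =====
-- def createLargestAnagram(n: str) -> str:
--     n_len = n.__len__()
--     n_list = [i for i in n]
--     for i in range(0,n_len):
--         for j in range(1, n_len - i):
--             if n_list[j] > n_list[j - 1]:
--                 tmp = n_list[j]
--                 n_list[j] = n_list[j - 1]
--                 n_list[j - 1] = tmp
--
--     return "".join(n_list)
-- ===== SOURCE B (Python) =====
-- def createLargestAnagram(n: str) -> str: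
--     counts = {}
--     for ch in n:
--         counts[ch] = counts.get(ch, 0) + 1
--     pieces = []
--     for ch in sorted(counts, reverse=True):
--         pieces.append(ch * counts[ch])
--     return "".join(pieces)
-- ===== Notes on version B (the rewrite author's own statement) =====
-- stated objective: faster
-- what changed: Replaces A's in-place O(n^2) bubble sort of the character list by a single counting pass building a character->frequency table, then emits each distinct character (walked in descending order) repeated by its count.
import Mathlib
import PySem

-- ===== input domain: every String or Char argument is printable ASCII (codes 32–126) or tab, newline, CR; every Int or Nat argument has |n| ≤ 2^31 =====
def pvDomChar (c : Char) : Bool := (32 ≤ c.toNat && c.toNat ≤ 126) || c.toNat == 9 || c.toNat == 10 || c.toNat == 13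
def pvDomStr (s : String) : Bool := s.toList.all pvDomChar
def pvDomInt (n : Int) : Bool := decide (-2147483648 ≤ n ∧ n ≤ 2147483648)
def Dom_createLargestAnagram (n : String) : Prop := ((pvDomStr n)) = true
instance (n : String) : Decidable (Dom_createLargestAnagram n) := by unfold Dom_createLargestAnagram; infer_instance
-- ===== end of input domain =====

-- B replaces A's in-place bubble sort of the character list by one counting pass (char -> count
-- dict) plus an emission of each distinct character, highest first, repeated by its count.
-- A mutates only its local list, so the equivalence is about the return value.

-- ===== PORT A =====
-- indices j and j-1 are always in range (1 ≤ j < n_len - i ≤ length), so the total pyGetD/pySetD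
-- forms with an arbitrary default are exact here.
def createLargestAnagram (n : String) : String :=
  let n_len : Int := PySem.Str.len n
  let n_list : List Char := n.toList
  let final : List Char :=
    (PySem.List.pyRange 0 n_len 1).foldl (fun l i =>
      (PySem.List.pyRange 1 (n_len - i) 1).foldl (fun l j =>
        if PySem.List.pyGetD l j ' ' > PySem.List.pyGetD l (j - 1) ' ' then
          let tmp := PySem.List.pyGetD l j ' '
          let l := PySem.List.pySetD l j (PySem.List.pyGetD l (j - 1) ' ')
          PySem.List.pySetD l (j - 1) tmp
        else l) l) n_list
  String.ofList final  -- "".join(n_list)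

-- ===== PORT B =====
-- counts[ch] = counts.get(ch, 0) + 1 is Dict.insert/getD; ch * counts[ch] is pyRepeat [ch];
-- "".join over the appended pieces is flattened at the character level.
def createLargestAnagram_alt (n : String) : String :=
  let counts : PySem.Dict Char Int :=
    n.toList.foldl (fun d ch => d.insert ch (d.getD ch 0 + 1)) PySem.Dict.empty
  let pieces : List Char :=
    (PySem.List.sorted (PySem.Dict.keys counts) (fun x => x) true).foldl
      (fun acc ch => acc ++ PySem.List.pyRepeat [ch] (counts.getD ch 0)) []
  String.ofList pieces

-- ===== PRECONDITION & SPEC =====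
def Spec_createLargestAnagram (n : String) (out : String) : Prop := out = createLargestAnagram_alt n
instance (n : String) (out : String) : Decidable (Spec_createLargestAnagram n out) := by unfold Spec_createLargestAnagram; infer_instance

-- ===== CLAIM (what is proved, stated in full; the proofs are below) =====
def Claim_equal_createLargestAnagram : Prop := ∀ (n : String), Dom_createLargestAnagram n → Spec_createLargestAnagram n (createLargestAnagram n)

-- ===== LEMMAS AND PROOFS =====

-- ---- A side: the index-level bubble sort, restated structurally ----

-- one bubble pass (descending: the minimum drifts to the end)
def bpass : List Char → List Char
  | [] => []
  | [a] => [a]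
  | a :: b :: t => if a < b then b :: bpass (a :: t) else a :: bpass (b :: t)

-- bubble sort as k passes over shrinking prefixes (prefix of length k+1 first)
def bsort : Nat → List Char → List Char
  | 0, l => l
  | k + 1, l => bsort k (bpass (l.take (k + 1)) ++ l.drop (k + 1))

-- A's inner-loop body at Int index j, and the same body Nat-indexed at positions k, k+1
def stepInt (l : List Char) (j : Int) : List Char :=
  if PySem.List.pyGetD l j ' ' > PySem.List.pyGetD l (j - 1) ' ' then
    let tmp := PySem.List.pyGetD l j ' '
    let l := PySem.List.pySetD l j (PySem.List.pyGetD l (j - 1) ' ')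
    PySem.List.pySetD l (j - 1) tmp
  else l

def gstep (l : List Char) (k : Nat) : List Char :=
  if l.getD k ' ' < l.getD (k + 1) ' ' then
    (l.set (k + 1) (l.getD k ' ')).set k (l.getD (k + 1) ' ')
  else l

theorem stepInt_eq_gstep (l : List Char) (k : Nat) :
    stepInt l (((k + 1 : Nat) : Int)) = gstep l k := by
  have h2 : (((k + 1 : Nat) : Int) - 1) = ((k : Nat) : Int) := by push_cast; ring
  simp only [stepInt, gstep, h2, PySem.List.pyGetD_natCast, PySem.List.pySetD_natCast,
    gt_iff_lt]

theorem gstep_cons (h : Char) (t : List Char) (k : Nat) :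
    gstep (h :: t) (k + 1) = h :: gstep t k := by
  simp only [gstep, List.getD_cons_succ, List.set_cons_succ]
  split_ifs <;> simp

theorem foldl_gstep_shift (js : List Nat) (h : Char) (t : List Char) :
    (js.map (· + 1)).foldl gstep (h :: t) = h :: js.foldl gstep t := by
  induction js generalizing t with
  | nil => rfl
  | cons j js ih => simp only [List.map_cons, List.foldl_cons, gstep_cons, ih]

-- the inner loop over j in range(1, m) is one bubble pass over the length-m prefix
theorem inner_eq (m : Nat) (l : List Char) (hm : m ≤ l.length) :
    (List.range (m - 1)).foldl gstep l = bpass (l.take m) ++ l.drop m := by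
  induction m generalizing l with
  | zero => simp [bpass]
  | succ k ih =>
    match k, l with
    | 0, [] => simp at hm
    | 0, a :: t => simp [bpass]
    | k + 1, a :: b :: t =>
      have hrange : List.range (k + 1) = 0 :: (List.range k).map (· + 1) := by
        have := List.range_succ_eq_map (n := k)
        simpa [Nat.succ_eq_add_one] using this
      have hg0 : gstep (a :: b :: t) 0 =
          if a < b then b :: a :: t else a :: b :: t := by
        simp only [gstep, List.getD_cons_succ, List.getD_cons_zero, List.set_cons_succ,
          List.set_cons_zero]
      have hlen : k + 1 ≤ (a :: t).length := by simp at hm ⊢; omega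
      show (List.range (k + 1)).foldl gstep (a :: b :: t) = _
      rw [hrange]
      simp only [List.foldl_cons, hg0]
      by_cases hab : a < b
      · rw [if_pos hab, foldl_gstep_shift]
        have h2 := ih (a :: t) hlen
        simp only [Nat.add_sub_cancel] at h2
        rw [h2]
        simp [bpass, hab]
      · rw [if_neg hab, foldl_gstep_shift]
        have h2 := ih (b :: t) (by simpa using hlen)
        simp only [Nat.add_sub_cancel] at h2
        rw [h2]
        simp [bpass, hab]

theorem conv_inner (mi : Int) (l : List Char) :
    (PySem.List.pyRange 1 mi 1).foldl stepInt l =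
      (List.range ((mi - 1).toNat)).foldl gstep l := by
  rw [PySem.List.pyRange_one, List.foldl_map]
  have hfun : (fun (acc : List Char) (k : Nat) => stepInt acc ((1 : Int) + (k : Int))) = gstep := by
    funext acc k
    have h1 : (1 : Int) + (k : Int) = ((k + 1 : Nat) : Int) := by push_cast; ring
    rw [h1, stepInt_eq_gstep]
  rw [hfun]

theorem bpass_perm (l : List Char) : (bpass l).Perm l := by
  fun_induction bpass l with
  | case1 => simp
  | case2 a => simp
  | case3 a b t h ih => exact (ih.cons b).trans (List.Perm.swap a b t)
  | case4 a b t h ih => exact ih.cons a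

theorem bpass_length (l : List Char) : (bpass l).length = l.length :=
  (bpass_perm l).length_eq

-- after a pass the last element of the prefix is a minimum
theorem bpass_min (l : List Char) (hl : l ≠ []) :
    ∃ ys m, bpass l = ys ++ [m] ∧ ∀ x ∈ l, m ≤ x := by
  fun_induction bpass l with
  | case1 => exact absurd rfl hl
  | case2 a => exact ⟨[], a, rfl, by simp⟩
  | case3 a b t h ih =>
    obtain ⟨ys, m, he, hmin⟩ := ih (by simp)
    refine ⟨b :: ys, m, by simp [he], ?_⟩
    intro x hx
    simp only [List.mem_cons] at hx
    rcases hx with rfl | rfl | hx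
    · exact hmin x (by simp)
    · exact le_of_lt (lt_of_le_of_lt (hmin a (by simp)) h)
    · exact hmin x (by simp [hx])
  | case4 a b t h ih =>
    obtain ⟨ys, m, he, hmin⟩ := ih (by simp)
    refine ⟨a :: ys, m, by simp [he], ?_⟩
    intro x hx
    simp only [List.mem_cons] at hx
    rcases hx with rfl | rfl | hx
    · exact le_trans (hmin b (by simp)) (le_of_not_gt h)
    · exact hmin x (by simp)
    · exact hmin x (by simp [hx])

-- loop invariant: the k-suffix holds the smallest elements, already in descending order
def BInv (k : Nat) (l : List Char) : Prop :=
  (∀ x ∈ l.take k, ∀ y ∈ l.drop k, y ≤ x) ∧ (l.drop k).Pairwise (fun a b => b ≤ a)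

theorem bsort_correct (k : Nat) (l : List Char) (hk : k ≤ l.length) (hI : BInv k l) :
    (bsort k l).Perm l ∧ (bsort k l).Pairwise (fun a b => b ≤ a) := by
  induction k generalizing l with
  | zero => exact ⟨List.Perm.refl l, by simpa [BInv] using hI.2⟩
  | succ k ih =>
    have htne : l.take (k + 1) ≠ [] := by
      intro h
      rcases List.take_eq_nil_iff.mp h with h' | h'
      · exact absurd h' (by omega)
      · subst h'; simp at hk
    obtain ⟨ys, m, he, hmin⟩ := bpass_min (l.take (k + 1)) htne
    have hplen : (bpass (l.take (k + 1))).length = k + 1 := by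
      rw [bpass_length]; simp; omega
    have hyslen : ys.length = k := by
      have := congrArg List.length he; simp [hplen] at this; omega
    set l' := bpass (l.take (k + 1)) ++ l.drop (k + 1) with hl'
    have hperm' : l'.Perm l := by
      have h2 := (bpass_perm (l.take (k + 1))).append_right (l.drop (k + 1))
      rw [List.take_append_drop] at h2
      exact h2
    have hlen' : l'.length = l.length := hperm'.length_eq
    have hmem_pref : ∀ x, x ∈ ys ++ [m] → x ∈ l.take (k + 1) := by
      intro x hx; rw [← he] at hx; exact (bpass_perm _).mem_iff.mp hx
    have hsplit : l' = ys ++ ([m] ++ l.drop (k + 1)) := by rw [hl', he]; simp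
    have htake' : l'.take k = ys := by
      rw [hsplit, List.take_append_of_le_length (by omega)]
      exact List.take_of_length_le (by omega)
    have hdrop' : l'.drop k = m :: l.drop (k + 1) := by
      rw [hsplit, List.drop_append_of_le_length (by omega)]
      simp [hyslen]
    have hI' : BInv k l' := by
      constructor
      · intro x hx y hy
        rw [htake'] at hx
        rw [hdrop'] at hy
        have hxpref : x ∈ l.take (k + 1) := hmem_pref x (by simp [hx])
        rcases List.mem_cons.mp hy with rfl | hy
        · exact hmin x hxpref
        · exact hI.1 x hxpref y hy
      · rw [hdrop']
        refine List.Pairwise.cons ?_ hI.2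
        intro y hy
        exact hI.1 m (hmem_pref m (by simp)) y hy
    have hres := ih l' (by omega) hI'
    exact ⟨(hres.1).trans hperm', hres.2⟩

-- the outer loop from i = N-k to N-1 performs bsort k
theorem conv_outer (N k : Nat) (l : List Char) (hl : l.length = N) (hk : k ≤ N) :
    (PySem.List.pyRange ((N : Int) - k) N 1).foldl
      (fun l i => (PySem.List.pyRange 1 ((N : Int) - i) 1).foldl stepInt l) l = bsort k l := by
  induction k generalizing l with
  | zero => simp [PySem.List.pyRange_one_eq_nil, bsort]
  | succ k ih =>
    rw [PySem.List.pyRange_one_cons (by omega)]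
    rw [List.foldl_cons]
    have hmi : (N : Int) - ((N : Int) - ((k + 1 : Nat) : Int)) = ((k + 1 : Nat) : Int) := by
      push_cast; ring
    have hstep : (PySem.List.pyRange 1 ((N : Int) - ((N : Int) - ((k + 1 : Nat) : Int))) 1).foldl
        stepInt l = bpass (l.take (k + 1)) ++ l.drop (k + 1) := by
      rw [hmi, conv_inner]
      have : (((k + 1 : Nat) : Int) - 1).toNat = (k + 1) - 1 := by push_cast; omega
      rw [this]
      exact inner_eq (k + 1) l (by omega)
    rw [hstep]
    have harg : (N : Int) - ((k + 1 : Nat) : Int) + 1 = (N : Int) - (k : Nat) := by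
      push_cast; ring
    rw [harg]
    have hlen' : (bpass (l.take (k + 1)) ++ l.drop (k + 1)).length = N := by
      rw [List.length_append, bpass_length, List.length_take, List.length_drop]
      omega
    rw [ih _ hlen' (by omega)]
    rfl

-- A's output is the structural bubble sort
theorem a_list_eq (n : String) :
    createLargestAnagram n =
      String.ofList (bsort n.toList.length n.toList) := by
  show String.ofList
      ((PySem.List.pyRange 0 (PySem.Str.len n) 1).foldl
        (fun l i => (PySem.List.pyRange 1 (PySem.Str.len n - i) 1).foldl stepInt l) n.toList) = _
  have hN : PySem.Str.len n = (n.toList.length : Int) := by simp [PySem.Str.len_eq]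
  rw [hN]
  have h0 : (0 : Int) = (n.toList.length : Int) - (n.toList.length : Nat) := by simp
  rw [h0, conv_outer n.toList.length n.toList.length n.toList rfl (le_refl _)]

-- ---- B side ----

theorem pairwise_flat (ks : List Char) (f : Char → Nat)
    (h : ks.Pairwise (fun a b => b < a)) :
    (ks.flatMap (fun c => List.replicate (f c) c)).Pairwise (fun a b => b ≤ a) := by
  induction ks with
  | nil => simp
  | cons c ks ih =>
    simp only [List.flatMap_cons]
    rw [List.pairwise_append]
    refine ⟨List.pairwise_replicate.mpr (Or.inr (le_refl c)), ih h.of_cons, ?_⟩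
    intro x hx y hy
    obtain ⟨c', hc', hy'⟩ := List.mem_flatMap.mp hy
    rw [List.eq_of_mem_replicate hx, List.eq_of_mem_replicate hy']
    exact le_of_lt (List.rel_of_pairwise_cons h hc')

theorem count_flat (ks : List Char) (f : Char → Nat) (c : Char) (hnd : ks.Nodup) :
    (ks.flatMap (fun k => List.replicate (f k) k)).count c = if c ∈ ks then f c else 0 := by
  induction ks with
  | nil => simp
  | cons k ks ih =>
    simp only [List.flatMap_cons, List.count_append, List.count_replicate]
    rw [ih hnd.of_cons]
    by_cases hck : c = k
    · subst hck
      have hnm : c ∉ ks := (List.nodup_cons.mp hnd).1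
      simp [hnm]
    · simp [hck, Ne.symm hck]

-- B's output as a flatMap of replicates over the descending distinct characters
theorem alt_list_eq (n : String) :
    createLargestAnagram_alt n =
      String.ofList
        ((PySem.List.sorted (PySem.Set.ofList n.toList) (fun x => x) true).flatMap
          (fun c => List.replicate (n.toList.count c) c)) := by
  show String.ofList
      ((PySem.List.sorted
          (PySem.Dict.keys (n.toList.foldl (fun d ch => d.insert ch (d.getD ch 0 + 1))
            PySem.Dict.empty)) (fun x => x) true).foldl
        (fun acc ch => acc ++ PySem.List.pyRepeat [ch]
          ((n.toList.foldl (fun d ch => d.insert ch (d.getD ch 0 + 1))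
            PySem.Dict.empty).getD ch 0)) []) = _
  rw [PySem.Dict.foldl_insert_getD_add_one_eq_counter, PySem.Dict.keys_counter]
  rw [PySem.List.foldl_append_eq_flatMap]
  rw [List.nil_append]
  congr 1
  congr 1
  funext c
  rw [PySem.Dict.getD_counter, PySem.List.pyRepeat_singleton]
  simp

theorem sortedKeys_nodup (n : String) :
    (PySem.List.sorted (PySem.Set.ofList n.toList) (fun x => x) true).Nodup :=
  (PySem.List.sorted_perm _ _ _).nodup_iff.mpr (PySem.Set.nodup_ofList _)

theorem sortedKeys_pairwise_gt (n : String) :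
    (PySem.List.sorted (PySem.Set.ofList n.toList) (fun x => x) true).Pairwise
      (fun a b => b < a) := by
  have h1 := PySem.List.sorted_pairwise_rev (xs := PySem.Set.ofList n.toList)
      (key := fun x : Char => x)
  have h2 : (PySem.List.sorted (PySem.Set.ofList n.toList) (fun x => x) true).Pairwise
      (· ≠ ·) := sortedKeys_nodup n
  exact (h1.and h2).imp (fun h => lt_of_le_of_ne h.1 (fun he => h.2 he.symm))

theorem alt_pairwise (n : String) :
    ((PySem.List.sorted (PySem.Set.ofList n.toList) (fun x => x) true).flatMap
      (fun c => List.replicate (n.toList.count c) c)).Pairwise (fun a b => b ≤ a) :=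
  pairwise_flat _ _ (sortedKeys_pairwise_gt n)

theorem alt_perm (n : String) :
    ((PySem.List.sorted (PySem.Set.ofList n.toList) (fun x => x) true).flatMap
      (fun c => List.replicate (n.toList.count c) c)).Perm n.toList := by
  apply List.perm_iff_count.mpr
  intro c
  rw [count_flat _ _ _ (sortedKeys_nodup n)]
  by_cases hc : c ∈ n.toList
  · rw [if_pos (by rw [PySem.List.mem_sorted, PySem.Set.mem_ofList]; exact hc)]
  · rw [if_neg (by rw [PySem.List.mem_sorted, PySem.Set.mem_ofList]; exact hc)]
    exact (List.count_eq_zero.mpr hc).symm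

theorem a_sorted (n : String) :
    (bsort n.toList.length n.toList).Perm n.toList ∧
      (bsort n.toList.length n.toList).Pairwise (fun a b => b ≤ a) := by
  apply bsort_correct _ _ (le_refl _)
  constructor
  · intro x _ y hy
    rw [List.drop_length] at hy
    exact absurd hy (by simp)
  · rw [List.drop_length]
    exact List.Pairwise.nil

-- ===== VERDICT (by name: the statement is the Claim_ definition above) =====
theorem createLargestAnagram_spec : Claim_equal_createLargestAnagram := by
  intro n _
  show createLargestAnagram n = createLargestAnagram_alt n
  rw [a_list_eq, alt_list_eq]
  congr 1
  exact List.Perm.eq_of_pairwise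
    (fun a b _ _ h1 h2 => le_antisymm h2 h1)
    (a_sorted n).2 (alt_pairwise n)
    ((a_sorted n).1.trans (alt_perm n).symm)
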